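-- pv_equiv track=rewrite | github.com/bgoonz/UsefulResourceRepo2.0 | MY_REPOS/PYTHON_PRAC/leetcode/Watering_Flowers_2.py | waterPlants
-- ===== SOURCE A (Python) =====
-- def waterPlants(plants, capacity1, capacity2):
--
--     if len(plants) == 0:
--         return 0
--
--     pointer1 = 0
--     pointer2 = len(plants) - 1
--
--     can1 = capacity1
--     can2 = capacity2
--     count = 2
--
--     while pointer1 != pointer2:
--         if can1 >= plants[pointer1]:
--             can1 -= plants[pointer1]
--             pointer1 += 1
--         else:
--             can1 = capacity1
--             can1 -= plants[pointer1]
--             pointer1 += 1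
--             count += 1
--
--         if can2 >= plants[pointer2]:
--             can2 -= plants[pointer2]
--             pointer2 -= 1
--         else:
--             can2 = capacity2
--             can2 -= plants[pointer2]
--             pointer2 -= 1
--             count += 1
--
--         if pointer1 == pointer2:
--             if (can1 + can2) >= plants[pointer1]:
--                 return count
--             else:
--                 return count + 1
--
--         elif pointer2 < pointer1:
--             return count
-- ===== SOURCE B (Python) =====
-- def _run(cap, plants_seg):
--     # greedy over one can's segment: returns (water left, number of refills)
--     can = cap
--     refills = 0
--     for p in plants_seg:
--         if can < p:
--             can = cap
--             refills += 1
--         can -= p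
--     return can, refills
--
--
-- def waterPlants(plants, capacity1, capacity2):
--     n = len(plants)
--     if n == 0:
--         return 0
--     half = n // 2
--     can1, r1 = _run(capacity1, plants[:half])
--     can2, r2 = _run(capacity2, list(reversed(plants[n - half:])))
--     count = 2 + r1 + r2
--     if n % 2 == 1:
--         if can1 + can2 >= plants[half]:
--             return count
--         return count + 1
--     return count
-- ===== Notes on version B (the rewrite author's own statement) =====
-- stated objective: simpler
-- what changed: Replaces A's interleaved two-pointer while-loop with in-loop meeting/crossing tests by a precomputed split at n//2, two independent greedy passes over the halves, and a single parity-based check of the shared middle plant (constant-factor faster: no per-iteration meeting tests).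
-- outside the precondition, e.g. on waterPlants([5], 4, 4): A returns None, B returns 2
import Mathlib
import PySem

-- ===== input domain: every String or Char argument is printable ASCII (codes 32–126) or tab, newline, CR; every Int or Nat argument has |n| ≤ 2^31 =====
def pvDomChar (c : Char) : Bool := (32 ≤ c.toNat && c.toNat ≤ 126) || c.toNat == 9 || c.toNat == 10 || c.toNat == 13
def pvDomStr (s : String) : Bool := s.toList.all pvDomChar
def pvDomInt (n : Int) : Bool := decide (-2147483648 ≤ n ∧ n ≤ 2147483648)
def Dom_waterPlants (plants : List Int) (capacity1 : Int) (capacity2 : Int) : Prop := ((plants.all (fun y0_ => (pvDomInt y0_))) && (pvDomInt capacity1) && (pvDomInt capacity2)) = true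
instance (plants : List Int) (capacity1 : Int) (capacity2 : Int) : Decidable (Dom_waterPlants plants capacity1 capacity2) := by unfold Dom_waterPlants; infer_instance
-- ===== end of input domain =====

-- B replaces A's interleaved two-pointer loop by two independent greedy passes over the
-- precomputed halves plus one parity-based middle check (objective: simpler).


-- ===== PORT A =====
-- A's while-loop. Every index dereferenced is in range in all reachable states, so
-- List.getD is exact for Python's plants[i] here.
def waterPlantsGo (plants : List Int) (capacity1 : Int) (capacity2 : Int)
    (p1 p2 : Nat) (can1 can2 count : Int) : Int :=
  if p1 = p2 then 0  -- Python falls off the loop returning None; only reachable when len(plants) = 1, excluded by Pre_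
  else
    let x1 := plants.getD p1 0
    let s1 : Int × Int := if can1 ≥ x1 then (can1 - x1, count) else (capacity1 - x1, count + 1)
    let p1' := p1 + 1
    let x2 := plants.getD p2 0
    let s2 : Int × Int := if can2 ≥ x2 then (can2 - x2, s1.2) else (capacity2 - x2, s1.2 + 1)
    let p2' := p2 - 1
    if p1' = p2' then
      if s1.1 + s2.1 ≥ plants.getD p1' 0 then s2.2 else s2.2 + 1
    else if p2' < p1' then s2.2
    else waterPlantsGo plants capacity1 capacity2 p1' p2' s1.1 s2.1 s2.2
termination_by p2 - p1
decreasing_by omega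

def waterPlants (plants : List Int) (capacity1 : Int) (capacity2 : Int) : Int :=
  if plants.length = 0 then 0
  else waterPlantsGo plants capacity1 capacity2 0 (plants.length - 1) capacity1 capacity2 2

-- ===== PORT B =====
-- _run(cap, seg): greedy pass of one can over its segment, returns (water left, refills)
def altRun (cap : Int) (seg : List Int) : Int × Int :=
  seg.foldl (fun (s : Int × Int) p =>
    if s.1 < p then (cap - p, s.2 + 1) else (s.1 - p, s.2)) (cap, 0)

-- plants[:half] = take, plants[n-half:] = drop (exact: nonnegative in-range bounds);
-- plants[half] in the odd branch has half < n, so getD is exact.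
def waterPlants_alt (plants : List Int) (capacity1 : Int) (capacity2 : Int) : Int :=
  let n := plants.length
  if n = 0 then 0
  else
    let half := n / 2
    let a := altRun capacity1 (plants.take half)
    let b := altRun capacity2 ((plants.drop (n - half)).reverse)
    let count := 2 + a.2 + b.2
    if n % 2 = 1 then
      if a.1 + b.1 ≥ plants.getD half 0 then count else count + 1
    else count

-- ===== PRECONDITION & SPEC =====
-- Pre_ excludes single-element lists: there A's loop never runs and A returns None,
-- which is not a value of the declared Int return type; B returns the natural count there.
def Pre_waterPlants (plants : List Int) (capacity1 : Int) (capacity2 : Int) : Prop :=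
  plants.length ≠ 1
instance (plants : List Int) (capacity1 : Int) (capacity2 : Int) : Decidable (Pre_waterPlants plants capacity1 capacity2) := by unfold Pre_waterPlants; infer_instance

def pvWitness_waterPlants : List Int × Int × Int := ([3, 2, 4], 2, 3)

def Spec_waterPlants (plants : List Int) (capacity1 : Int) (capacity2 : Int) (out : Int) : Prop := out = waterPlants_alt plants capacity1 capacity2
instance (plants : List Int) (capacity1 : Int) (capacity2 : Int) (out : Int) : Decidable (Spec_waterPlants plants capacity1 capacity2 out) := by unfold Spec_waterPlants; infer_instance

-- ===== CLAIM (what is proved, stated in full; the proofs are below) =====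
def Claim_equal_waterPlants : Prop := ∀ (plants : List Int) (capacity1 : Int) (capacity2 : Int), Dom_waterPlants plants capacity1 capacity2 → Pre_waterPlants plants capacity1 capacity2 → Spec_waterPlants plants capacity1 capacity2 (waterPlants plants capacity1 capacity2)

-- ===== LEMMAS AND PROOFS =====

-- B's fold step
def altStep (cap : Int) (s : Int × Int) (p : Int) : Int × Int :=
  if s.1 < p then (cap - p, s.2 + 1) else (s.1 - p, s.2)

theorem altRun_eq_foldl (cap : Int) (seg : List Int) :
    altRun cap seg = seg.foldl (altStep cap) (cap, 0) := rfl

-- the refill counter is additive in its start value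
theorem foldl_altStep_shift (cap : Int) (xs : List Int) (can c : Int) :
    xs.foldl (altStep cap) (can, c) =
      ((xs.foldl (altStep cap) (can, 0)).1, c + (xs.foldl (altStep cap) (can, 0)).2) := by
  induction xs generalizing can c with
  | nil => simp
  | cons x xs ih =>
    simp only [List.foldl_cons, altStep]
    split_ifs with h
    · rw [ih (cap - x) (c + 1), ih (cap - x) (0 + 1)]
      simp only [Prod.mk.injEq]
      exact ⟨trivial, by omega⟩
    · rw [ih (can - x) c, ih (can - x) 0]

theorem foldl_altStep_start (cap : Int) (xs : List Int) (s : Int × Int) :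
    xs.foldl (altStep cap) s =
      ((xs.foldl (altStep cap) (s.1, 0)).1, s.2 + (xs.foldl (altStep cap) (s.1, 0)).2) := by
  obtain ⟨a, b⟩ := s
  exact foldl_altStep_shift cap xs a b

-- the remaining plants of the left can, current pointer p1, split point half
def leftSeg (plants : List Int) (half p1 : Nat) : List Int :=
  (plants.take half).drop p1
-- the remaining plants of the right can, current pointer p2 (as drop count n-1-p2)
def rightSeg (plants : List Int) (half k : Nat) : List Int :=
  ((plants.drop (plants.length - half)).reverse).drop k

theorem leftSeg_cons (plants : List Int) (half p1 : Nat) (h1 : p1 < half) (h2 : half ≤ plants.length) :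
    leftSeg plants half p1 = plants.getD p1 0 :: leftSeg plants half (p1 + 1) := by
  have hlen : p1 < (plants.take half).length := by simp; omega
  have hp : p1 < plants.length := by omega
  rw [leftSeg, List.drop_eq_getElem_cons hlen, leftSeg]
  congr 1
  rw [List.getElem_take, List.getD_eq_getElem plants 0 hp]

theorem rightSeg_cons (plants : List Int) (half k : Nat) (hk : k < half) (h2 : half ≤ plants.length) :
    rightSeg plants half k = plants.getD (plants.length - 1 - k) 0 :: rightSeg plants half (k + 1) := by
  have hdl : (plants.drop (plants.length - half)).length = half := by simp; omega
  have hrl : k < ((plants.drop (plants.length - half)).reverse).length := by simp [hdl]; omega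
  rw [rightSeg, List.drop_eq_getElem_cons hrl, rightSeg]
  congr 1
  rw [List.getElem_reverse]
  rw [List.getElem_drop]
  have hp : plants.length - 1 - k < plants.length := by omega
  rw [List.getD_eq_getElem plants 0 hp]
  have hidx : plants.length - half + ((plants.drop (plants.length - half)).length - 1 - k) = plants.length - 1 - k := by
    simp only [List.length_drop]; omega
  simp only [hidx]

theorem leftSeg_nil (plants : List Int) (half p : Nat) (h : half ≤ p) :
    leftSeg plants half p = [] := by
  apply List.drop_eq_nil_of_le
  simp; omega

theorem rightSeg_nil (plants : List Int) (half k : Nat) (h : half ≤ k) :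
    rightSeg plants half k = [] := by
  apply List.drop_eq_nil_of_le
  simp; omega

-- the meaning of one loop iteration's can/count update as an altStep
theorem stepA_eq (cap can count x : Int) :
    (if can ≥ x then (can - x, count) else (cap - x, count + 1)) =
      ((altStep cap (can, 0) x).1, count + (altStep cap (can, 0) x).2) := by
  simp only [altStep]
  split_ifs <;> simp_all <;> omega

-- main invariant: the A-loop from a symmetric state (p1 + p2 = n - 1, p1 < p2) computes
-- B's two independent greedy passes over what remains, plus the middle check
theorem go_eq (plants : List Int) (cap1 cap2 : Int) :
    ∀ gap p1 p2 can1 can2 count, p2 - p1 = gap → p1 < p2 → p1 + p2 + 1 = plants.length →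
    waterPlantsGo plants cap1 cap2 p1 p2 can1 can2 count =
      (let n := plants.length
       let half := n / 2
       let a := (leftSeg plants half p1).foldl (altStep cap1) (can1, 0)
       let b := (rightSeg plants half (n - 1 - p2)).foldl (altStep cap2) (can2, 0)
       let cnt := count + a.2 + b.2
       if n % 2 = 1 then
         if a.1 + b.1 ≥ plants.getD half 0 then cnt else cnt + 1
       else cnt) := by
  intro gap
  induction gap using Nat.strong_induction_on with
  | _ gap ih =>
    intro p1 p2 can1 can2 count hg h12 hn
    have hne : ¬ p1 = p2 := by omega
    have hhalf1 : p1 < plants.length / 2 := by omega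
    have hhalf2 : plants.length - 1 - p2 < plants.length / 2 := by omega
    have hle : plants.length / 2 ≤ plants.length := by omega
    rw [waterPlantsGo, if_neg hne]
    simp only []
    rw [stepA_eq cap1, stepA_eq cap2]
    by_cases hc1 : p1 + 1 = p2 - 1
    · -- the two pointers meet at the middle plant: gap = 2, odd length
      rw [if_pos hc1]
      have hp2 : p2 = p1 + 2 := by omega
      have hhalf : plants.length / 2 = p1 + 1 := by omega
      have hodd : plants.length % 2 = 1 := by omega
      have hk : plants.length - 1 - p2 = p1 := by omega
      have he : plants.length - 1 - p1 = p2 := by omega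
      rw [hk, hhalf, hodd,
          leftSeg_cons plants (p1 + 1) p1 (by omega) (by omega),
          leftSeg_nil plants (p1 + 1) (p1 + 1) (by omega),
          rightSeg_cons plants (p1 + 1) p1 (by omega) (by omega),
          rightSeg_nil plants (p1 + 1) (p1 + 1) (by omega), he]
      simp only [List.foldl_cons, List.foldl_nil, altStep]
      split_ifs <;> omega
    · rw [if_neg hc1]
      by_cases hc2 : p2 - 1 < p1 + 1
      · -- the pointers cross: gap = 1, even length
        rw [if_pos hc2]
        have hp2 : p2 = p1 + 1 := by omega
        have hhalf : plants.length / 2 = p1 + 1 := by omega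
        have hev : ¬ plants.length % 2 = 1 := by omega
        have hk : plants.length - 1 - p2 = p1 := by omega
        have he : plants.length - 1 - p1 = p2 := by omega
        rw [hk, hhalf, if_neg hev,
            leftSeg_cons plants (p1 + 1) p1 (by omega) (by omega),
            leftSeg_nil plants (p1 + 1) (p1 + 1) (by omega),
            rightSeg_cons plants (p1 + 1) p1 (by omega) (by omega),
            rightSeg_nil plants (p1 + 1) (p1 + 1) (by omega), he]
        simp only [List.foldl_cons, List.foldl_nil, altStep]
      · -- gap ≥ 3: recurse and peel one plant from each end
        rw [if_neg hc2]
        have h13 : p1 + 1 < p2 - 1 := by omega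
        rw [ih (gap - 2) (by omega) (p1 + 1) (p2 - 1) _ _ _ (by omega) h13 (by omega)]
        simp only []
        have hk1 : plants.length - 1 - (p2 - 1) = (plants.length - 1 - p2) + 1 := by omega
        have he : plants.length - 1 - (plants.length - 1 - p2) = p2 := by omega
        rw [hk1,
            leftSeg_cons plants (plants.length / 2) p1 (by omega) (by omega),
            rightSeg_cons plants (plants.length / 2) (plants.length - 1 - p2) (by omega) (by omega), he]
        simp only [List.foldl_cons]
        rw [foldl_altStep_start cap1 (leftSeg plants (plants.length / 2) (p1 + 1))
              (altStep cap1 (can1, 0) (plants.getD p1 0)),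
            foldl_altStep_start cap2 (rightSeg plants (plants.length / 2) (plants.length - 1 - p2 + 1))
              (altStep cap2 (can2, 0) (plants.getD p2 0))]
        split_ifs <;> omega

-- ===== VERDICT (by name: the statement is the Claim_ definition above) =====
theorem waterPlants_spec : Claim_equal_waterPlants := by
  intro plants c1 c2 _ hpre
  unfold Spec_waterPlants waterPlants waterPlants_alt
  by_cases h0 : plants.length = 0
  · rw [if_pos h0, if_pos h0]
  · have h2 : 2 ≤ plants.length := by
      unfold Pre_waterPlants at hpre; omega
    rw [if_neg h0, if_neg h0]
    rw [go_eq plants c1 c2 (plants.length - 1) 0 (plants.length - 1) c1 c2 2 rfl (by omega) (by omega)]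
    simp only [altRun_eq_foldl, leftSeg, rightSeg, List.drop_zero, Nat.sub_self]
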